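-- pv_equiv track=rewrite | github.com/AliceInWonderland61/spring2025-python | Week2/week-2-S2-P2.py | unique_souvenir_counts
-- ===== SOURCE A (Python) =====
-- def unique_souvenir_counts(souvenirs):
--
--     #so my idea is to create a dictionary for those items and if we come cross a souvenur again, then we automatically return false
--     #after the loop ends, we return true
--     #i keep reading things wrong, so we want to make sure that the value per key is not the same for other keys
--
--     souvenir_counts={}
--     for i in souvenirs:
--         if i in souvenir_counts:
--             souvenir_counts[i] += 1
--         else:
--             souvenir_counts[i] = 1
--
--     #so i'm trying to see how to do this, i might have to do another for loop
--     #for each key, search through the other values of the dictionary to see if we have a siilar value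
--
--     for i in souvenir_counts:
--         for j in souvenir_counts:
--             #we want to make sure that the values are not the same
--             # we don't want to compare the same key to itself so we add a condition that if i and j are the same key we skip
--             #if i and j are different keys BUT the values are the same, then that means we have to return False because the
--             #occurences are the same for two different keys
--             if i!=j and souvenir_counts[i] == souvenir_counts[j]:
--                 return False
--     return True
-- ===== SOURCE B (Python) =====
-- def unique_souvenir_counts(souvenirs):
--     souvenir_counts = {}
--     for i in souvenirs:
--         if i in souvenir_counts:
--             souvenir_counts[i] += 1
--         else:
--             souvenir_counts[i] = 1
--     vals = sorted(souvenir_counts.values())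
--     for a, b in zip(vals, vals[1:]):
--         if a == b:
--             return False
--     return True
-- ===== Notes on version B (the rewrite author's own statement) =====
-- stated objective: alternative
-- what changed: Replaces A's nested pairwise comparison over dict keys with sorting the count values once and a single linear scan over adjacent pairs; in exchange it always sorts, where A's quadratic scan can exit early.
import Mathlib
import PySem

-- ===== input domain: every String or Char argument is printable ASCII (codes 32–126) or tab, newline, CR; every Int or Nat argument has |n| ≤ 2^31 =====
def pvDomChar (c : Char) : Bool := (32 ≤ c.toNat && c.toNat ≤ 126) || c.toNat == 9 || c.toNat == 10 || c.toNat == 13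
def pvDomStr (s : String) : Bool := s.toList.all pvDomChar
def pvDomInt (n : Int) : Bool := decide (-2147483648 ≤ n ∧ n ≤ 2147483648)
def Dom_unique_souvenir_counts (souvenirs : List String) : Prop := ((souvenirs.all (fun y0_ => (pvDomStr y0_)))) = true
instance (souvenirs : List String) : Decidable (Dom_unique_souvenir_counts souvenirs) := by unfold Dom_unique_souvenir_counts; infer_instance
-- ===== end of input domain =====

-- B sorts the count values once and scans adjacent pairs instead of A's nested pairwise comparison over dict keys.


-- ===== PORT A =====
-- the first loop: if i in d: d[i] += 1 else: d[i] = 1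
def pvCountLoop (souvenirs : List String) : PySem.Dict String Int :=
  souvenirs.foldl
    (fun d i => if d.contains i then d.insert i (d.getD i 0 + 1) else d.insert i 1)
    PySem.Dict.empty

-- nested loop with early 'return False' ≡ an existential over the key list; d[i] is exact as
-- getD i 0 because i, j range over d's keys (no KeyError possible).
def unique_souvenir_counts (souvenirs : List String) : Bool :=
  let d := pvCountLoop souvenirs
  if d.keys.any (fun i => d.keys.any (fun j => decide (i ≠ j) && decide (d.getD i 0 = d.getD j 0)))
  then false else true

-- ===== PORT B =====
-- the 'for a, b in zip(vals, vals[1:]): if a == b: return False' scan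
def pvAdjScan : List Int → Bool
  | a :: b :: t => if a = b then false else pvAdjScan (b :: t)
  | _ => true

def unique_souvenir_counts_alt (souvenirs : List String) : Bool :=
  let d := pvCountLoop souvenirs
  pvAdjScan (PySem.List.sorted d.values (fun x => x) false)

-- ===== PRECONDITION & SPEC =====
def Spec_unique_souvenir_counts (souvenirs : List String) (out : Bool) : Prop := out = unique_souvenir_counts_alt souvenirs
instance (souvenirs : List String) (out : Bool) : Decidable (Spec_unique_souvenir_counts souvenirs out) := by unfold Spec_unique_souvenir_counts; infer_instance

-- ===== CLAIM (what is proved, stated in full; the proofs are below) =====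
def Claim_equal_unique_souvenir_counts : Prop := ∀ (souvenirs : List String), Dom_unique_souvenir_counts souvenirs → Spec_unique_souvenir_counts souvenirs (unique_souvenir_counts souvenirs)

-- ===== LEMMAS AND PROOFS =====

-- the counting loop is Counter(souvenirs)
theorem pvCountLoop_eq_counter (souvenirs : List String) :
    pvCountLoop souvenirs = PySem.Dict.counter souvenirs := by
  rw [← PySem.Dict.foldl_insert_getD_add_one_eq_counter]
  unfold pvCountLoop
  induction souvenirs using List.reverseRecOn with
  | nil => rfl
  | append_singleton l x ih =>
    rw [List.foldl_append, List.foldl_append, ih]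
    simp only [List.foldl_cons, List.foldl_nil]
    split_ifs with h
    · rfl
    · rw [Bool.not_eq_true] at h
      rw [PySem.Dict.getD_of_not_contains _ _ h]
      norm_num

-- on a ≤-sorted list the adjacent-pair scan decides Nodup
theorem pvAdjScan_sorted_iff_nodup :
    ∀ (l : List Int), l.Pairwise (· ≤ ·) → (pvAdjScan l = true ↔ l.Nodup) := by
  intro l
  induction l with
  | nil => intro _; simp [pvAdjScan]
  | cons a t ih =>
    cases t with
    | nil => intro _; simp [pvAdjScan]
    | cons b t' =>
      intro hp
      rcases List.pairwise_cons.mp hp with ⟨hall, hp'⟩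
      by_cases hab : a = b
      · subst hab
        simp [pvAdjScan]
      · have hscan : pvAdjScan (a :: b :: t') = pvAdjScan (b :: t') := by
          simp [pvAdjScan, hab]
        rw [hscan, ih hp', List.nodup_cons]
        have hnotmem : a ∉ b :: t' := by
          have hab' : a < b := lt_of_le_of_ne (hall b (by simp)) hab
          intro hm
          rcases List.mem_cons.mp hm with h | h
          · exact hab h
          · have hbx : b ≤ a := List.rel_of_pairwise_cons hp' h
            omega
        simp [hnotmem]

-- A = true iff the list of count values has no duplicate
theorem portA_iff (souvenirs : List String) :
    unique_souvenir_counts souvenirs = true ↔ (pvCountLoop souvenirs).values.Nodup := by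
  have hnd : (pvCountLoop souvenirs).keys.Nodup := by
    rw [pvCountLoop_eq_counter]; exact PySem.Dict.nodup_keys_counter souvenirs
  unfold unique_souvenir_counts
  rw [PySem.Dict.values_eq_map_keys (pvCountLoop souvenirs) hnd 0]
  by_cases hC : ((pvCountLoop souvenirs).keys.any fun i =>
      (pvCountLoop souvenirs).keys.any fun j =>
        decide (i ≠ j) && decide ((pvCountLoop souvenirs).getD i 0 = (pvCountLoop souvenirs).getD j 0)) = true
  · rw [if_pos hC]
    simp only [List.any_eq_true, Bool.and_eq_true, decide_eq_true_eq] at hC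
    obtain ⟨i, hi, j, hj, hij, heq⟩ := hC
    exact iff_of_false (by simp) (fun hndm => hij (List.inj_on_of_nodup_map hndm hi hj heq))
  · rw [if_neg hC]
    simp only [List.any_eq_true, Bool.and_eq_true, decide_eq_true_eq, not_exists, not_and] at hC
    refine iff_of_true rfl ?_
    refine List.Nodup.map_on ?_ hnd
    intro x hx y hy hfe
    by_contra hxy
    exact hC x hx y hy hxy hfe

-- B = true iff the list of count values has no duplicate
theorem portB_iff (souvenirs : List String) :
    unique_souvenir_counts_alt souvenirs = true ↔ (pvCountLoop souvenirs).values.Nodup := by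
  unfold unique_souvenir_counts_alt
  have hperm := PySem.List.sorted_perm (pvCountLoop souvenirs).values (fun x : Int => x) false
  have hle : (PySem.List.sorted (pvCountLoop souvenirs).values (fun x : Int => x) false).Pairwise (· ≤ ·) := by
    simpa using PySem.List.sorted_pairwise (pvCountLoop souvenirs).values (fun x : Int => x)
  rw [pvAdjScan_sorted_iff_nodup _ hle]
  exact hperm.nodup_iff

theorem ports_agree (souvenirs : List String) :
    unique_souvenir_counts souvenirs = unique_souvenir_counts_alt souvenirs := by
  rw [Bool.eq_iff_iff, portA_iff, portB_iff]

-- ===== VERDICT (by name: the statement is the Claim_ definition above) =====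
theorem unique_souvenir_counts_spec : Claim_equal_unique_souvenir_counts := by
  intro souvenirs _
  exact ports_agree souvenirs
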